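-- pv_equiv track=rewrite | github.com/pipoaihq-bot/bitwise-lead-tracker | import_chorus_prospects.py | determine_region
-- ===== SOURCE A (Python) =====
-- def determine_region(website, linkedin, company_name):
--     """Determine region based on domain clues"""
--     text = f"{website} {linkedin} {company_name}".lower()
--
--     if any(x in text for x in ['.ch', 'swiss', 'switzerland', 'zurich', 'geneva', 'basel']):
--         return 'CH'
--     elif any(x in text for x in ['.de', 'germany', 'berlin', 'munich', 'frankfurt', 'hamburg']):
--         return 'DE'
--     elif any(x in text for x in ['.uk', '.co.uk', 'british', 'london', 'england']):
--         return 'UK'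
--     elif any(x in text for x in ['uae', 'dubai', 'abudhabi', '.ae']):
--         return 'UAE'
--     elif any(x in text for x in ['.no', '.se', '.dk', '.fi', 'norway', 'sweden', 'denmark', 'finland', 'nordic']):
--         return 'NORDICS'
--     else:
--         return 'DE'  # Default to DE for European prospects
-- ===== SOURCE B (Python) =====
-- # One flat pass over all (clue, rank) pairs keeping the minimum rank seen,
-- # then index into the region name table (rank 5 = no match = default 'DE').
-- CLUES = [
--     ('.ch', 0), ('swiss', 0), ('switzerland', 0), ('zurich', 0), ('geneva', 0), ('basel', 0),
--     ('.de', 1), ('germany', 1), ('berlin', 1), ('munich', 1), ('frankfurt', 1), ('hamburg', 1),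
--     ('.uk', 2), ('.co.uk', 2), ('british', 2), ('london', 2), ('england', 2),
--     ('uae', 3), ('dubai', 3), ('abudhabi', 3), ('.ae', 3),
--     ('.no', 4), ('.se', 4), ('.dk', 4), ('.fi', 4), ('norway', 4),
--     ('sweden', 4), ('denmark', 4), ('finland', 4), ('nordic', 4),
-- ]
-- NAMES = ['CH', 'DE', 'UK', 'UAE', 'NORDICS', 'DE']
--
-- def determine_region(website, linkedin, company_name):
--     """Determine region based on domain clues"""
--     text = f"{website} {linkedin} {company_name}".lower()
--     best = 5
--     for clue, rank in CLUES:
--         if clue in text: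
--             best = min(best, rank)
--     return NAMES[best]
-- ===== Notes on version B (the rewrite author's own statement) =====
-- stated objective: alternative
-- what changed: Replaces the short-circuiting if/elif group chain with a single flat pass over all (clue, rank) pairs that accumulates the minimum matching rank and indexes a name table (rank 5 = default); no grouping or early return remains.
import Mathlib
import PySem

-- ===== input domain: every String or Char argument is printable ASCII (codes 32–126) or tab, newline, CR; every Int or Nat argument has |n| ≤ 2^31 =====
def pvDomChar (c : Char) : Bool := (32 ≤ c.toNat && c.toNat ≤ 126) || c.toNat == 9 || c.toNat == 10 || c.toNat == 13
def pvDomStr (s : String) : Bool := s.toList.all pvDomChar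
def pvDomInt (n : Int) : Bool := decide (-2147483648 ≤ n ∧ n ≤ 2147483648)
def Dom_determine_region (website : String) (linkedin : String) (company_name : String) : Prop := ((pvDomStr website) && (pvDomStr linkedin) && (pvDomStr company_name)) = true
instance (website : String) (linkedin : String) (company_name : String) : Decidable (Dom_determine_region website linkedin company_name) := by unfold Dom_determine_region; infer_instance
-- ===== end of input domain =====

-- B replaces A's short-circuiting if/elif group chain by one flat min-rank pass over all (clue, rank) pairs plus a name-table lookup (alternative decomposition, same cost).

-- ===== PORT A =====
def determine_region (website : String) (linkedin : String) (company_name : String) : String :=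
  let text := PySem.Str.lower (website ++ " " ++ linkedin ++ " " ++ company_name)
  if [".ch", "swiss", "switzerland", "zurich", "geneva", "basel"].any (fun x => PySem.Str.isIn x text) then "CH"
  else if [".de", "germany", "berlin", "munich", "frankfurt", "hamburg"].any (fun x => PySem.Str.isIn x text) then "DE"
  else if [".uk", ".co.uk", "british", "london", "england"].any (fun x => PySem.Str.isIn x text) then "UK"
  else if ["uae", "dubai", "abudhabi", ".ae"].any (fun x => PySem.Str.isIn x text) then "UAE"
  else if [".no", ".se", ".dk", ".fi", "norway", "sweden", "denmark", "finland", "nordic"].any (fun x => PySem.Str.isIn x text) then "NORDICS"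
  else "DE"

-- ===== PORT B =====
def pvClues : List (String × Nat) :=
  [(".ch", 0), ("swiss", 0), ("switzerland", 0), ("zurich", 0), ("geneva", 0), ("basel", 0),
   (".de", 1), ("germany", 1), ("berlin", 1), ("munich", 1), ("frankfurt", 1), ("hamburg", 1),
   (".uk", 2), (".co.uk", 2), ("british", 2), ("london", 2), ("england", 2),
   ("uae", 3), ("dubai", 3), ("abudhabi", 3), (".ae", 3),
   (".no", 4), (".se", 4), (".dk", 4), (".fi", 4), ("norway", 4),
   ("sweden", 4), ("denmark", 4), ("finland", 4), ("nordic", 4)]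

def pvNames : List String := ["CH", "DE", "UK", "UAE", "NORDICS", "DE"]

def determine_region_alt (website : String) (linkedin : String) (company_name : String) : String :=
  let text := PySem.Str.lower (website ++ " " ++ linkedin ++ " " ++ company_name)
  let best := pvClues.foldl (fun best p => if PySem.Str.isIn p.1 text then min best p.2 else best) 5
  pvNames.getD best "DE"

-- ===== PRECONDITION & SPEC =====
def Spec_determine_region (website : String) (linkedin : String) (company_name : String) (out : String) : Prop := out = determine_region_alt website linkedin company_name
instance (website : String) (linkedin : String) (company_name : String) (out : String) : Decidable (Spec_determine_region website linkedin company_name out) := by unfold Spec_determine_region; infer_instance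

-- ===== CLAIM (what is proved, stated in full; the proofs are below) =====
def Claim_equal_determine_region : Prop := ∀ (website : String) (linkedin : String) (company_name : String), Dom_determine_region website linkedin company_name → Spec_determine_region website linkedin company_name (determine_region website linkedin company_name)

-- ===== LEMMAS AND PROOFS =====

-- folding the min-rank step over a group of clues that all carry rank r = one any-test
theorem pv_group_fold (text : String) (r : Nat) (cs : List String) : ∀ acc : Nat,
    List.foldl (fun best p => if PySem.Str.isIn p.1 text then min best p.2 else best) acc
      (cs.map (fun c => (c, r)))
    = if cs.any (fun c => PySem.Str.isIn c text) then min acc r else acc := by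
  induction cs with
  | nil => intro acc; rfl
  | cons c cs ih =>
    intro acc
    rw [List.map_cons, List.foldl_cons, List.any_cons]
    by_cases h : PySem.Str.isIn c text = true
    · rw [if_pos h, ih]
      simp only [h, Bool.true_or, if_true]
      split
      · rw [Nat.min_assoc, Nat.min_self]
      · rfl
    · rw [if_neg h, ih]
      simp only [Bool.not_eq_true] at h
      rw [h, Bool.false_or]

-- ===== VERDICT (by name: the statement is the Claim_ definition above) =====
theorem determine_region_spec : Claim_equal_determine_region := by
  intro website linkedin company_name _
  unfold Spec_determine_region determine_region determine_region_alt
  set text := PySem.Str.lower (website ++ " " ++ linkedin ++ " " ++ company_name) with htext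
  have hsplit : pvClues =
      ([".ch", "swiss", "switzerland", "zurich", "geneva", "basel"].map (fun c => (c, 0)))
      ++ ([".de", "germany", "berlin", "munich", "frankfurt", "hamburg"].map (fun c => (c, 1)))
      ++ ([".uk", ".co.uk", "british", "london", "england"].map (fun c => (c, 2)))
      ++ (["uae", "dubai", "abudhabi", ".ae"].map (fun c => (c, 3)))
      ++ ([".no", ".se", ".dk", ".fi", "norway", "sweden", "denmark", "finland", "nordic"].map (fun c => (c, 4))) := by
    rfl
  rw [hsplit]
  simp only [List.foldl_append, pv_group_fold]
  generalize ([".ch", "swiss", "switzerland", "zurich", "geneva", "basel"].any fun c => PySem.Str.isIn c text) = b1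
  generalize ([".de", "germany", "berlin", "munich", "frankfurt", "hamburg"].any fun c => PySem.Str.isIn c text) = b2
  generalize ([".uk", ".co.uk", "british", "london", "england"].any fun c => PySem.Str.isIn c text) = b3
  generalize (["uae", "dubai", "abudhabi", ".ae"].any fun c => PySem.Str.isIn c text) = b4
  generalize ([".no", ".se", ".dk", ".fi", "norway", "sweden", "denmark", "finland", "nordic"].any fun c => PySem.Str.isIn c text) = b5
  cases b1 <;> cases b2 <;> cases b3 <;> cases b4 <;> cases b5 <;> rfl
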